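-- pv_equiv track=rewrite | github.com/IvanPchelin/module_2_6.py | module_2_6.py | get_parol
-- ===== SOURCE A (Python) =====
-- def get_parol(nomer):
--     parol =  ""
--     for b in range(1, nomer):
--         for c in range(2, nomer):
--             if b >= c:
--                 continue
--             if nomer % (b+c) == 0:
--              parol += str(b) + str(c)
--     return parol
-- ===== SOURCE B (Python) =====
-- def get_parol(nomer):
--     # precompute the divisors of nomer that can appear as a pair sum
--     divs = [s for s in range(3, nomer + 1) if nomer % s == 0]
--     parol = ""
--     for b in range(1, nomer):
--         for s in divs:
--             if s > 2 * b:
--                 parol += str(b) + str(s - b)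
--     return parol
-- ===== Notes on version B (the rewrite author's own statement) =====
-- stated objective: faster
-- what changed: Instead of testing every pair (b,c) with a nested O(n^2) scan, B precomputes the divisors of nomer once and, for each b, emits c = s - b for each divisor s > 2b, preserving the ascending order.
import Mathlib
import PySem

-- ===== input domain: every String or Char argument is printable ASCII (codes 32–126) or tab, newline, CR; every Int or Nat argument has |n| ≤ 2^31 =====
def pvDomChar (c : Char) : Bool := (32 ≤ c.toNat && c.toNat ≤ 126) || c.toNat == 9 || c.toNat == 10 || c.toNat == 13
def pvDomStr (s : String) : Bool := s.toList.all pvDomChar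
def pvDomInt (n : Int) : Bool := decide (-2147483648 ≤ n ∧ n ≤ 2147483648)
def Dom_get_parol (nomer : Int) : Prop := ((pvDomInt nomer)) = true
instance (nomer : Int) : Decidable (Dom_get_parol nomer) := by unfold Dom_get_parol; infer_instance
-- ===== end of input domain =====

-- B replaces A's nested O(n^2) pair scan by precomputing the divisors of nomer once (faster).

-- ===== PORT A =====
def get_parol (nomer : Int) : String :=
  let crange := PySem.List.pyRange 2 nomer 1  -- range(2, nomer), identical each outer iteration; built once
  (PySem.List.pyRange 1 nomer 1).foldl (fun parol b =>
    crange.foldl (fun parol c =>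
      if b ≥ c then parol
      else if PySem.Int.mod nomer (b + c) == 0 then
        parol ++ (PySem.Int.toStr b ++ PySem.Int.toStr c)
      else parol) parol) ""

-- ===== PORT B =====
def get_parol_alt (nomer : Int) : String :=
  let divs := (PySem.List.pyRange 3 (nomer + 1) 1).filter (fun s => PySem.Int.mod nomer s == 0)
  (PySem.List.pyRange 1 nomer 1).foldl (fun parol b =>
    divs.foldl (fun parol s =>
      if s > 2 * b then
        parol ++ (PySem.Int.toStr b ++ PySem.Int.toStr (s - b))
      else parol) parol) ""

-- ===== PRECONDITION & SPEC =====
def Spec_get_parol (nomer : Int) (out : String) : Prop := out = get_parol_alt nomer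
instance (nomer : Int) (out : String) : Decidable (Spec_get_parol nomer out) := by unfold Spec_get_parol; infer_instance

-- ===== CLAIM (what is proved, stated in full; the proofs are below) =====
def Claim_equal_get_parol : Prop := ∀ (nomer : Int), Dom_get_parol nomer → Spec_get_parol nomer (get_parol nomer)

-- ===== LEMMAS AND PROOFS =====

-- concatenation of a list of strings
def pvJ : List String → String
  | [] => ""
  | s :: t => s ++ pvJ t

theorem pvJ_append (l₁ l₂ : List String) : pvJ (l₁ ++ l₂) = pvJ l₁ ++ pvJ l₂ := by
  induction l₁ with
  | nil => simp [pvJ]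
  | cons x t ih => simp [pvJ, ih, String.append_assoc]

theorem pvFoldl_strapp {α : Type} (l : List α) (g : α → String) (a : String) :
    l.foldl (fun acc x => acc ++ g x) a = a ++ pvJ (l.map g) := by
  induction l generalizing a with
  | nil => simp [pvJ]
  | cons x t ih => simp [pvJ, ih, String.append_assoc]

theorem pvJ_map_empty {α : Type} (l : List α) (g : α → String)
    (h : ∀ x ∈ l, g x = "") : pvJ (l.map g) = "" := by
  induction l with
  | nil => simp [pvJ]
  | cons x t ih =>
    simp only [List.map_cons, pvJ, h x (by simp)]
    rw [ih (fun y hy => h y (by simp [hy]))]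
    simp

-- the common per-pair piece: emit the pair (b, s-b) when the sum s divides n and 2b < s
def pvG (n b s : Int) : String :=
  if 2 * b < s ∧ PySem.Int.mod n s = 0 then PySem.Int.toStr b ++ PySem.Int.toStr (s - b) else ""

-- A's inner-loop summand, folded into pvG via the substitution s = b + c
theorem pvA_term (n b c : Int) :
    (if b ≥ c then ""
     else if PySem.Int.mod n (b + c) == 0 then PySem.Int.toStr b ++ PySem.Int.toStr c
     else "") = pvG n b (b + c) := by
  have e : b + c - b = c := by ring
  by_cases hc : b ≥ c
  · have hn : ¬ (2 * b < b + c ∧ PySem.Int.mod n (b + c) = 0) := by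
      rintro ⟨h1, _⟩; omega
    simp [pvG, hc, hn]
  · by_cases hm : PySem.Int.mod n (b + c) = 0
    · have hp : 2 * b < b + c ∧ PySem.Int.mod n (b + c) = 0 := ⟨by omega, hm⟩
      simp [pvG, hc, hm, hp, e]
    · have hn : ¬ (2 * b < b + c ∧ PySem.Int.mod n (b + c) = 0) := by
        rintro ⟨_, h2⟩; exact hm h2
      simp [pvG, hc, hm]

-- B's inner loop over the filtered divisor list equals the pvG-sum over the whole range
theorem pvB_filter (n b : Int) (l : List Int) :
    pvJ ((l.filter (fun s => PySem.Int.mod n s == 0)).map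
          (fun s => if s > 2 * b then PySem.Int.toStr b ++ PySem.Int.toStr (s - b) else ""))
      = pvJ (l.map (pvG n b)) := by
  induction l with
  | nil => simp
  | cons x t ih =>
    by_cases hq : PySem.Int.mod n x = 0
    · by_cases hp : 2 * b < x
      · simp [hq, hp, pvJ, pvG, ih, gt_iff_lt]
      · simp [hq, hp, pvJ, pvG, ih, gt_iff_lt]
    · have hn : ¬ (2 * b < x ∧ PySem.Int.mod n x = 0) := by rintro ⟨_, h⟩; exact hq h
      simp [hq, pvJ, pvG, ih]

-- shifting A's c-range [2, n) by b gives the s-range [b+2, b+n)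
theorem pvA_shift (n b : Int) :
    (PySem.List.pyRange 2 n 1).map (fun c => pvG n b (b + c))
      = (PySem.List.pyRange (b + 2) (b + n) 1).map (pvG n b) := by
  rw [PySem.List.pyRange_one 2 n, PySem.List.pyRange_one (b + 2) (b + n)]
  have e : b + n - (b + 2) = n - 2 := by ring
  rw [e]
  simp only [List.map_map]
  apply List.map_congr_left
  intro k _
  simp only [Function.comp]
  congr 1
  ring

-- the shifted range and the divisor range give the same string: the extra ends contribute ""
theorem pvRange_adjust (n b : Int) (hb1 : 1 ≤ b) (hb2 : b < n) :
    pvJ ((PySem.List.pyRange (b + 2) (b + n) 1).map (pvG n b))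
      = pvJ ((PySem.List.pyRange 3 (n + 1) 1).map (pvG n b)) := by
  rw [PySem.List.pyRange_one_append 3 (b + 2) (n + 1) (by omega) (by omega)]
  rw [PySem.List.pyRange_one_append (b + 2) (n + 1) (b + n) (by omega) (by omega)]
  rw [List.map_append, List.map_append, pvJ_append, pvJ_append]
  have h1 : pvJ ((PySem.List.pyRange 3 (b + 2) 1).map (pvG n b)) = "" := by
    apply pvJ_map_empty
    intro s hs
    rw [PySem.List.mem_pyRange_one] at hs
    have hn : ¬ (2 * b < s ∧ PySem.Int.mod n s = 0) := by rintro ⟨h, _⟩; omega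
    simp [pvG, hn]
  have h2 : pvJ ((PySem.List.pyRange (n + 1) (b + n) 1).map (pvG n b)) = "" := by
    apply pvJ_map_empty
    intro s hs
    rw [PySem.List.mem_pyRange_one] at hs
    have hmod : PySem.Int.mod n s = n := by
      rw [PySem.Int.mod_eq_emod_of_pos (by omega)]
      exact Int.emod_eq_of_lt (by omega) (by omega)
    have hn : ¬ (2 * b < s ∧ PySem.Int.mod n s = 0) := by
      rintro ⟨_, h⟩; rw [hmod] at h; omega
    simp [pvG, hn]
  rw [h1, h2]
  simp

-- per-b equality of the two inner loops, for b actually visited by the outer loop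
theorem pvInner (n b : Int) (hb : b ∈ PySem.List.pyRange 1 n 1) :
    pvJ ((PySem.List.pyRange 2 n 1).map (fun c =>
        if b ≥ c then ""
        else if PySem.Int.mod n (b + c) == 0 then PySem.Int.toStr b ++ PySem.Int.toStr c
        else ""))
      = pvJ (((PySem.List.pyRange 3 (n + 1) 1).filter (fun s => PySem.Int.mod n s == 0)).map
          (fun s => if s > 2 * b then PySem.Int.toStr b ++ PySem.Int.toStr (s - b) else "")) := by
  rw [PySem.List.mem_pyRange_one] at hb
  have hmapA : (PySem.List.pyRange 2 n 1).map (fun c =>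
      if b ≥ c then ""
      else if PySem.Int.mod n (b + c) == 0 then PySem.Int.toStr b ++ PySem.Int.toStr c
      else "") = (PySem.List.pyRange 2 n 1).map (fun c => pvG n b (b + c)) := by
    apply List.map_congr_left; intro c _; exact pvA_term n b c
  rw [hmapA, pvA_shift, pvRange_adjust n b hb.1 hb.2, pvB_filter]

-- ===== VERDICT (by name: the statement is the Claim_ definition above) =====
theorem get_parol_spec : Claim_equal_get_parol := by
  unfold Claim_equal_get_parol
  intro n _
  unfold Spec_get_parol get_parol get_parol_alt
  have stepA : ∀ (parol : String) (b : Int),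
      (PySem.List.pyRange 2 n 1).foldl (fun parol c =>
        if b ≥ c then parol
        else if PySem.Int.mod n (b + c) == 0 then
          parol ++ (PySem.Int.toStr b ++ PySem.Int.toStr c)
        else parol) parol
        = parol ++ pvJ ((PySem.List.pyRange 2 n 1).map (fun c =>
            if b ≥ c then ""
            else if PySem.Int.mod n (b + c) == 0 then PySem.Int.toStr b ++ PySem.Int.toStr c
            else "")) := by
    intro parol b
    rw [PySem.List.foldl_congr_mem (g := fun acc c => acc ++
        (if b ≥ c then ""
         else if PySem.Int.mod n (b + c) == 0 then PySem.Int.toStr b ++ PySem.Int.toStr c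
         else ""))]
    · exact pvFoldl_strapp _ _ _
    · intro acc c _
      by_cases h1 : b ≥ c <;> by_cases h2 : PySem.Int.mod n (b + c) == 0 <;>
        simp [h1, h2]
  have stepB : ∀ (parol : String) (b : Int),
      ((PySem.List.pyRange 3 (n + 1) 1).filter (fun s => PySem.Int.mod n s == 0)).foldl
        (fun parol s =>
          if s > 2 * b then parol ++ (PySem.Int.toStr b ++ PySem.Int.toStr (s - b))
          else parol) parol
        = parol ++ pvJ (((PySem.List.pyRange 3 (n + 1) 1).filter
            (fun s => PySem.Int.mod n s == 0)).map
            (fun s => if s > 2 * b then PySem.Int.toStr b ++ PySem.Int.toStr (s - b) else "")) := by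
    intro parol b
    rw [PySem.List.foldl_congr_mem (g := fun acc s => acc ++
        (if s > 2 * b then PySem.Int.toStr b ++ PySem.Int.toStr (s - b) else ""))]
    · exact pvFoldl_strapp _ _ _
    · intro acc s _
      by_cases h1 : s > 2 * b <;> simp [h1]
  calc (PySem.List.pyRange 1 n 1).foldl (fun parol b =>
          (PySem.List.pyRange 2 n 1).foldl (fun parol c =>
            if b ≥ c then parol
            else if PySem.Int.mod n (b + c) == 0 then
              parol ++ (PySem.Int.toStr b ++ PySem.Int.toStr c)
            else parol) parol) ""
      = (PySem.List.pyRange 1 n 1).foldl (fun parol b => parol ++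
          pvJ (((PySem.List.pyRange 3 (n + 1) 1).filter (fun s => PySem.Int.mod n s == 0)).map
            (fun s => if s > 2 * b then PySem.Int.toStr b ++ PySem.Int.toStr (s - b) else ""))) "" := by
        apply PySem.List.foldl_congr_mem
        intro acc b hb
        rw [stepA acc b, pvInner n b hb]
    _ = _ := by
        apply Eq.symm
        apply PySem.List.foldl_congr_mem
        intro acc b _
        exact stepB acc b
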